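-- pv_equiv track=rewrite | github.com/hyuna0926/ontology_based_kg_paper | ontology_kg/synonym_pruning/synonym.py | filter_relations_by_patterns
-- ===== SOURCE A (Python) =====
-- from typing import Dict, List, Tuple, Optional
--
-- def filter_relations_by_patterns(relations: List[str],
--                                 excluded_patterns: Optional[List[str]] = None) -> Tuple[List[str], List[str], Dict[str, bool]]:
--     if not excluded_patterns:
--         return relations, [], {r: False for r in relations}
--
--     excluded_relations = []
--     filtered_relations = []
--     exclusion_map = {}
--
--     for relation in relations:
--         is_excluded = False
--         for pattern in excluded_patterns:
--             if pattern.lower() in relation.lower():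
--                 is_excluded = True
--                 break
--
--         if is_excluded:
--             excluded_relations.append(relation)
--             exclusion_map[relation] = True
--         else:
--             filtered_relations.append(relation)
--             exclusion_map[relation] = False
--
--     return filtered_relations, excluded_relations, exclusion_map
-- ===== SOURCE B (Python) =====
-- def filter_relations_by_patterns(relations, excluded_patterns=None):
--     # Pattern-major sweep: each relation is lowered once; for every lowered
--     # pattern we scan the lowered relations and collect hits in a set.
--     lowered = [(r, r.lower()) for r in relations]
--     bad = set()
--     for pat in (excluded_patterns or []):
--         p = pat.lower()
--         for r, rl in lowered:
--             if p in rl: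
--                 bad.add(r)
--     filtered = [r for r in relations if r not in bad]
--     excluded = [r for r in relations if r in bad]
--     emap = {r: (r in bad) for r in relations}
--     return filtered, excluded, emap
-- ===== Notes on version B (the rewrite author's own statement) =====
-- stated objective: alternative
-- what changed: B inverts the loop nesting: instead of A's relation-major loop with a per-relation break over patterns, B lowers every relation once, then sweeps the lowered relations once per lowered pattern collecting matching relations into a set, and finally derives the filtered/excluded lists and the map from that set; correct because exclusion depends only on the relation's content.
import Mathlib
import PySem

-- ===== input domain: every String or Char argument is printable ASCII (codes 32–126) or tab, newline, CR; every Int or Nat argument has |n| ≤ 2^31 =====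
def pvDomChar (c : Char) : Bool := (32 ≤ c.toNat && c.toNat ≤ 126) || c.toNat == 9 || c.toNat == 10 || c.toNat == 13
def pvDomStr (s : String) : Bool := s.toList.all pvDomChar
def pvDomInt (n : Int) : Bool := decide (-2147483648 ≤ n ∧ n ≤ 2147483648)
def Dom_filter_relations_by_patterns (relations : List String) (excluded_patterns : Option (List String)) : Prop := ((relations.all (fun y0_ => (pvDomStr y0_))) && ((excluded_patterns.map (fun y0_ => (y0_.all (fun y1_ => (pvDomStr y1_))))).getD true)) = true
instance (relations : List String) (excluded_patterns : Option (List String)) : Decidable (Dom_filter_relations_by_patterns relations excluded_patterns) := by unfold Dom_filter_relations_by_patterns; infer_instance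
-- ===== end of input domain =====

-- B inverts the loop nesting (pattern-major sweep collecting excluded relations into a set, with each string lowered once); same result, alternative structure.

-- ===== PORT A =====
-- inner loop with break: first pattern whose lowering occurs in relation.lower()
def pvA_isExcluded (relation : String) : List String → Bool
  | [] => false
  | p :: ps =>
    if PySem.Str.isIn (PySem.Str.lower p) (PySem.Str.lower relation) then true
    else pvA_isExcluded relation ps

def filter_relations_by_patterns (relations : List String) (excluded_patterns : Option (List String)) : List String × List String × (List (String × Bool)) :=
  if excluded_patterns = none ∨ excluded_patterns = some [] then
    (relations, [], (relations.foldl (fun d r => d.insert r false) (PySem.Dict.empty : PySem.Dict String Bool)).items)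
  else
    let pats := excluded_patterns.getD []
    let st := relations.foldl
      (fun (st : List String × List String × PySem.Dict String Bool) relation =>
        if pvA_isExcluded relation pats then
          (st.1, st.2.1 ++ [relation], st.2.2.insert relation true)
        else
          (st.1 ++ [relation], st.2.1, st.2.2.insert relation false))
      ([], [], PySem.Dict.empty)
    (st.1, st.2.1, st.2.2.items)

-- ===== PORT B =====
def filter_relations_by_patterns_alt (relations : List String) (excluded_patterns : Option (List String)) : List String × List String × (List (String × Bool)) :=
  let lowered := relations.map (fun r => (r, PySem.Str.lower r))
  let bad := (excluded_patterns.getD []).foldl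
    (fun (s : PySem.Set String) pat =>
      let p := PySem.Str.lower pat
      lowered.foldl (fun s rr => if PySem.Str.isIn p rr.2 then PySem.Set.add s rr.1 else s) s)
    PySem.Set.empty
  let filtered := relations.filter (fun r => !(PySem.Set.contains bad r))
  let excluded := relations.filter (fun r => PySem.Set.contains bad r)
  let emap := relations.foldl
    (fun (d : PySem.Dict String Bool) r => d.insert r (PySem.Set.contains bad r))
    (PySem.Dict.empty : PySem.Dict String Bool)
  (filtered, excluded, emap.items)

-- ===== PRECONDITION & SPEC =====
def Spec_filter_relations_by_patterns (relations : List String) (excluded_patterns : Option (List String)) (out : List String × List String × (List (String × Bool))) : Prop := out = filter_relations_by_patterns_alt relations excluded_patterns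
instance (relations : List String) (excluded_patterns : Option (List String)) (out : List String × List String × (List (String × Bool))) : Decidable (Spec_filter_relations_by_patterns relations excluded_patterns out) := by unfold Spec_filter_relations_by_patterns; infer_instance

-- ===== CLAIM (what is proved, stated in full; the proofs are below) =====
def Claim_equal_filter_relations_by_patterns : Prop := ∀ (relations : List String) (excluded_patterns : Option (List String)), Dom_filter_relations_by_patterns relations excluded_patterns → Spec_filter_relations_by_patterns relations excluded_patterns (filter_relations_by_patterns relations excluded_patterns)

-- ===== LEMMAS AND PROOFS =====

-- A's break-loop equals any over the patterns
theorem pvA_isExcluded_eq_any (relation : String) (pats : List String) :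
    pvA_isExcluded relation pats
      = pats.any (fun p => PySem.Str.isIn (PySem.Str.lower p) (PySem.Str.lower relation)) := by
  induction pats with
  | nil => rfl
  | cons p ps ih => simp [pvA_isExcluded, List.any_cons, ih]

-- inner sweep of B: membership in the set after one pattern's pass
theorem pvB_inner_mem (q : String → Bool) (l : List (String × String)) (s : PySem.Set String) (x : String) :
    (x ∈ l.foldl (fun s rr => if q rr.2 then PySem.Set.add s rr.1 else s) s)
      ↔ x ∈ s ∨ ∃ rr ∈ l, q rr.2 ∧ x = rr.1 := by
  induction l generalizing s with
  | nil => simp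
  | cons rr rs ih =>
    by_cases h : q rr.2 = true <;>
      simp [List.foldl_cons, h, ih, PySem.Set.mem_add] <;> tauto

-- outer sweep of B: membership in the final set
theorem pvB_bad_mem (pats : List String) (l : List (String × String)) (s : PySem.Set String) (x : String) :
    (x ∈ pats.foldl
        (fun (s : PySem.Set String) pat =>
          l.foldl (fun s rr => if PySem.Str.isIn (PySem.Str.lower pat) rr.2 then PySem.Set.add s rr.1 else s) s)
        s)
      ↔ x ∈ s ∨ ∃ p ∈ pats, ∃ rr ∈ l, PySem.Str.isIn (PySem.Str.lower p) rr.2 ∧ x = rr.1 := by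
  induction pats generalizing s with
  | nil => simp
  | cons p ps ih =>
    simp only [List.foldl_cons, ih, pvB_inner_mem, List.mem_cons]
    constructor
    · rintro ((h | ⟨rr, hrr, hq, hx⟩) | ⟨p', hp', h⟩)
      · exact Or.inl h
      · exact Or.inr ⟨p, Or.inl rfl, rr, hrr, hq, hx⟩
      · exact Or.inr ⟨p', Or.inr hp', h⟩
    · rintro (h | ⟨p', hp' | hp', h⟩)
      · exact Or.inl (Or.inl h)
      · exact Or.inl (Or.inr (hp' ▸ h))
      · exact Or.inr ⟨p', hp', h⟩

-- on members of relations, B's set membership coincides with A's per-relation test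
theorem pvB_contains_eq (pats relations : List String) (r : String) (hr : r ∈ relations) :
    PySem.Set.contains
      (pats.foldl
        (fun (s : PySem.Set String) pat =>
          (relations.map (fun r => (r, PySem.Str.lower r))).foldl
            (fun s rr => if PySem.Str.isIn (PySem.Str.lower pat) rr.2 then PySem.Set.add s rr.1 else s) s)
        PySem.Set.empty) r
      = pvA_isExcluded r pats := by
  rw [pvA_isExcluded_eq_any]
  by_cases h : (pats.any (fun p => PySem.Str.isIn (PySem.Str.lower p) (PySem.Str.lower r))) = true
  · rw [h]
    simp only [List.any_eq_true] at h
    obtain ⟨p, hp, hq⟩ := h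
    have hmem : (r, PySem.Str.lower r) ∈ relations.map (fun r => (r, PySem.Str.lower r)) := by
      exact List.mem_map.2 ⟨r, hr, rfl⟩
    have : r ∈ _ := (pvB_bad_mem pats _ PySem.Set.empty r).2
      (Or.inr ⟨p, hp, (r, PySem.Str.lower r), hmem, hq, rfl⟩)
    exact (PySem.Set.contains_iff _ _).2 this
  · rw [eq_false_of_ne_true h]
    rw [Bool.eq_false_iff]
    intro hc
    apply h
    have := (pvB_bad_mem pats _ PySem.Set.empty r).1 ((PySem.Set.contains_iff _ _).1 hc)
    simp only [PySem.Set.empty] at this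
    rcases this with h' | ⟨p, hp, rr, hrr, hq, hx⟩
    · simp at h'
    · obtain ⟨r', _, hr'⟩ := List.mem_map.1 hrr
      simp only [List.any_eq_true]
      exact ⟨p, hp, by rw [hx, ← hr']; rw [← hr'] at hq; exact hq⟩

-- A's accumulator loop, characterised
theorem pvA_loop_char (c : String → Bool) (l : List String)
    (f e : List String) (m : PySem.Dict String Bool) :
    l.foldl
      (fun (st : List String × List String × PySem.Dict String Bool) relation =>
        if c relation then
          (st.1, st.2.1 ++ [relation], st.2.2.insert relation true)
        else
          (st.1 ++ [relation], st.2.1, st.2.2.insert relation false))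
      (f, e, m)
      = (f ++ l.filter (fun r => !(c r)), e ++ l.filter c,
         l.foldl (fun d r => d.insert r (c r)) m) := by
  induction l generalizing f e m with
  | nil => simp
  | cons x xs ih =>
    by_cases hx : c x = true <;>
      simp [List.foldl_cons, hx, ih]

-- ===== VERDICT (by name: the statement is the Claim_ definition above) =====
theorem filter_relations_by_patterns_spec : Claim_equal_filter_relations_by_patterns := by
  intro relations ep _
  unfold Spec_filter_relations_by_patterns filter_relations_by_patterns filter_relations_by_patterns_alt
  have hfilt := List.filter_congr (l := relations)
    (fun r hr => congrArg Bool.not (pvB_contains_eq (ep.getD []) relations r hr))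
  have hfilt2 := List.filter_congr (l := relations)
    (fun r hr => pvB_contains_eq (ep.getD []) relations r hr)
  have hdict : relations.foldl
      (fun (d : PySem.Dict String Bool) r => d.insert r (PySem.Set.contains
        ((ep.getD []).foldl
          (fun (s : PySem.Set String) pat =>
            (relations.map (fun r => (r, PySem.Str.lower r))).foldl
              (fun s rr => if PySem.Str.isIn (PySem.Str.lower pat) rr.2 then PySem.Set.add s rr.1 else s) s)
          PySem.Set.empty) r))
      PySem.Dict.empty
    = relations.foldl (fun (d : PySem.Dict String Bool) r => d.insert r (pvA_isExcluded r (ep.getD []))) PySem.Dict.empty := by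
    apply PySem.List.foldl_congr_mem
    intro d r hr
    rw [pvB_contains_eq (ep.getD []) relations r hr]
  simp only []
  by_cases h0 : ep = none ∨ ep = some []
  · rw [if_pos h0]
    have hep : ep.getD [] = [] := by rcases h0 with h | h <;> subst h <;> rfl
    simp [hep]
  · rw [if_neg h0]
    rw [pvA_loop_char (fun relation => pvA_isExcluded relation (ep.getD [])) relations [] [] PySem.Dict.empty]
    simp only [List.nil_append]
    refine Prod.ext ?_ (Prod.ext ?_ ?_) <;> simp only []
    · exact hfilt.symm
    · exact hfilt2.symm
    · exact congrArg PySem.Dict.items hdict.symm
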